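-- pv_equiv track=rewrite | github.com/MHoghede/wit_messenger_chatbot_automated_logic | wit_ai_chatbot_db.py | binaryToEntities
-- ===== SOURCE A (Python) =====
-- def binaryToEntities(binary,all_entities):
--     binary1 = binary
--     acc_value,i, n = 0, 0, 0
--     selected_entities=[]
--     while(binary != 0):
--         acc_value = binary % 0b10
--         if(acc_value):
--             selected_entities.append(all_entities[i])
--         binary = binary//0b10
--         i += 1
--     return selected_entities
-- ===== SOURCE B (Python) =====
-- def binaryToEntities(binary, all_entities):
--     # Render the number once as its binary digit string and select the entity
--     # at each position whose digit (least significant first) is '1'.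
--     return [all_entities[i] for i, d in enumerate(reversed(bin(binary)[2:])) if d == '1']
-- ===== Notes on version B (the rewrite author's own statement) =====
-- stated objective: idiomatic
-- what changed: B renders the number once as its binary digit string via bin() and selects entities by enumerating the reversed digits, replacing A's destructive halving loop with its running modulus/index/append accumulator state; Pre_ excludes binary < 0 (A loops forever) and binary >= 2**len(all_entities) (A raises IndexError).
import Mathlib
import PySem

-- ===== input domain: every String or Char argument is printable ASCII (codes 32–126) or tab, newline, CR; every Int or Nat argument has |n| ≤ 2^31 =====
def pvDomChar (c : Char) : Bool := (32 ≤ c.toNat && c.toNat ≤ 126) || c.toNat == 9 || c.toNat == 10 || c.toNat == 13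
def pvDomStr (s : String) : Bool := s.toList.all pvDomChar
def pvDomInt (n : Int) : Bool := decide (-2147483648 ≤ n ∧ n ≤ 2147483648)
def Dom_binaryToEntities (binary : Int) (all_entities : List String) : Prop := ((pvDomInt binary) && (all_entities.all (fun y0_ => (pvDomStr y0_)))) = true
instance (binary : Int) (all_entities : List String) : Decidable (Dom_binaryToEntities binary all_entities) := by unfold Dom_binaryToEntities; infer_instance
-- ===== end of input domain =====

-- B replaces A's destructive halving loop (running index + append accumulator) by rendering the
-- number once as its binary digit string and zipping the reversed digits with the entities
-- (objective: idiomatic, same cost).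

-- ===== PORT A =====
-- A's while loop, totalized with fuel (binary.toNat + 1 steps suffice for 0 ≤ binary;
-- for binary < 0 the Python loop never terminates — such inputs are excluded by Pre_).
def binaryToEntitiesLoop (fuel : Nat) (binary : Int) (i : Int)
    (all_entities : List String) (selected_entities : List String) : List String :=
  match fuel with
  | 0 => selected_entities
  | fuel + 1 =>
    if binary = 0 then selected_entities
    else
      let acc_value := PySem.Int.mod binary 2
      let selected' :=
        if acc_value ≠ 0 then
          match PySem.List.pyGet? all_entities i with
          | some e => selected_entities ++ [e]
          | none => selected_entities  -- IndexError in Python; excluded by Pre_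
        else selected_entities
      binaryToEntitiesLoop fuel (PySem.Int.floordiv binary 2) (i + 1) all_entities selected'

def binaryToEntities (binary : Int) (all_entities : List String) : List String :=
  binaryToEntitiesLoop (binary.toNat + 1) binary 0 all_entities []

-- ===== PORT B =====
-- hand port of Python's bin(n)[2:] for n ≥ 0 (PySem has no bin): most-significant digit first,
-- bin(0)[2:] = "0"; exact on 0 ≤ n, which is all Pre_ admits
def pyBinAux (n : Nat) : List Char :=
  match n with
  | 0 => []
  | n + 1 => pyBinAux ((n + 1) / 2) ++ [if (n + 1) % 2 = 1 then '1' else '0']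
decreasing_by omega

def pyBin (n : Nat) : List Char := if n = 0 then ['0'] else pyBinAux n

-- the comprehension `[all_entities[i] for i, d in enumerate(reversed(bin(binary)[2:])) if d == '1']`;
-- bin(binary) is '-0b…'/'0b…' ++ the digits, then [2:] drops two characters — exact for all Int;
-- pyGet? = none is Python's IndexError (the comprehension raises there; excluded by Pre_)
def binaryToEntities_alt (binary : Int) (all_entities : List String) : List String :=
  let s := (if binary < 0 then ['-'] else []) ++ ['0', 'b'] ++ pyBin binary.natAbs
  (PySem.List.enumerate ((s.drop 2).reverse) 0).filterMap
    (fun p => if p.2 = '1' then PySem.List.pyGet? all_entities p.1 else none)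

-- ===== PRECONDITION & SPEC =====
-- Pre_ excludes binary < 0 (A's while loop never terminates there) and
-- binary ≥ 2^len(all_entities) (A raises IndexError at the first set bit beyond the list).
def Pre_binaryToEntities (binary : Int) (all_entities : List String) : Prop :=
  0 ≤ binary ∧ binary < 2 ^ all_entities.length

instance (binary : Int) (all_entities : List String) : Decidable (Pre_binaryToEntities binary all_entities) := by
  unfold Pre_binaryToEntities; infer_instance

def pvWitness_binaryToEntities : Int × List String := (5, ["a", "b", "c"])

def Spec_binaryToEntities (binary : Int) (all_entities : List String) (out : List String) : Prop := out = binaryToEntities_alt binary all_entities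
instance (binary : Int) (all_entities : List String) (out : List String) : Decidable (Spec_binaryToEntities binary all_entities out) := by unfold Spec_binaryToEntities; infer_instance

-- ===== CLAIM (what is proved, stated in full; the proofs are below) =====
def Claim_equal_binaryToEntities : Prop := ∀ (binary : Int) (all_entities : List String), Dom_binaryToEntities binary all_entities → Pre_binaryToEntities binary all_entities → Spec_binaryToEntities binary all_entities (binaryToEntities binary all_entities)


-- ===== LEMMAS AND PROOFS =====

-- reversing the digit string yields the bits least-significant first
theorem pvRevAux (n : Nat) (hn : 0 < n) :
    (pyBinAux n).reverse = (if n % 2 = 1 then '1' else '0') :: (pyBinAux (n / 2)).reverse := by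
  obtain ⟨m, rfl⟩ : ∃ m, n = m + 1 := ⟨n - 1, by omega⟩
  rw [pyBinAux]
  simp

-- B's enumerate-filter over the reversed digits collects the entities at the set-bit positions
theorem pvZ : ∀ (n m i : Nat) (all : List String), n < 2 ^ m → i + m ≤ all.length →
    (PySem.List.enumerate ((pyBinAux n).reverse) ((i : Nat) : Int)).filterMap
        (fun p => if p.2 = '1' then PySem.List.pyGet? all p.1 else none)
      = ((List.range m).filter n.testBit).map (fun k => all.getD (i + k) "") := by
  intro n
  induction n using Nat.strong_induction_on with
  | _ n ih =>
    intro m i all hlt hlen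
    rcases Nat.eq_zero_or_pos n with rfl | hn
    · simp [pyBinAux, PySem.List.enumerate_nil, Nat.zero_testBit]
    · have hm1 : 1 ≤ m := by
        by_contra hc
        have : m = 0 := by omega
        subst this
        simp at hlt; omega
      obtain ⟨m', rfl⟩ : ∃ m', m = m' + 1 := ⟨m - 1, by omega⟩
      rw [pvRevAux n hn, PySem.List.enumerate_cons]
      have hi1 : ((i : Nat) : Int) + 1 = (((i + 1 : Nat) : Nat) : Int) := by push_cast; ring
      have hdivm : n / 2 < 2 ^ m' := by
        have h2 : 2 ^ (m' + 1) = 2 ^ m' * 2 := by ring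
        omega
      have hrec := ih (n / 2) (Nat.div_lt_self hn (by omega)) m' (i + 1) all hdivm (by omega)
      have hget : PySem.List.pyGet? all ((i : Nat) : Int) = some (all.getD i "") := by
        rw [PySem.List.pyGet?_natCast]
        rw [List.getElem?_eq_getElem (by omega), List.getD_eq_getElem all "" (by omega)]
      have hsplit : ((List.range (m' + 1)).filter n.testBit).map (fun k => all.getD (i + k) "")
          = (if n % 2 = 1 then [all.getD i ""] else [])
            ++ ((List.range m').filter (n / 2).testBit).map (fun k => all.getD ((i + 1) + k) "") := by
        rw [List.range_succ_eq_map, List.filter_cons, List.filter_map, Nat.testBit_zero]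
        have hp : (n.testBit ∘ Nat.succ) = (n / 2).testBit := by
          funext k; exact Nat.testBit_succ n k
        rw [hp]
        by_cases hpar : n % 2 = 1
        · rw [if_pos (by simpa using hpar), if_pos hpar, List.map_cons, List.map_map]
          simp only [Nat.add_zero, List.singleton_append, List.cons.injEq, true_and]
          apply List.map_congr_left
          intro k _
          have h3 : i + (k + 1) = i + 1 + k := by omega
          simp [Function.comp, Nat.succ_eq_add_one, h3]
        · rw [if_neg (by simpa using hpar), if_neg hpar, List.map_map, List.nil_append]
          apply List.map_congr_left
          intro k _
          have h3 : i + (k + 1) = i + 1 + k := by omega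
          simp [Function.comp, Nat.succ_eq_add_one, h3]
      rw [hsplit, List.filterMap_cons, hi1, hrec]
      by_cases hpar : n % 2 = 1
      · rw [if_pos hpar, if_pos hpar]
        simp [hget]
      · rw [if_neg hpar, if_neg hpar]
        simp

-- A's while loop appends the entities at the set-bit positions, in ascending order
theorem pvLoopLem : ∀ (fuel n m i : Nat) (all acc : List String),
    n < fuel → n < 2 ^ m → i + m ≤ all.length →
    binaryToEntitiesLoop fuel ((n : Nat) : Int) ((i : Nat) : Int) all acc
      = acc ++ ((List.range m).filter n.testBit).map (fun k => all.getD (i + k) "") := by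
  intro fuel
  induction fuel with
  | zero => intro n m i all acc hf; omega
  | succ fuel ih =>
    intro n m i all acc hf hm hlen
    rw [binaryToEntitiesLoop]
    by_cases h0 : ((n : Nat) : Int) = 0
    · have hn0 : n = 0 := by exact_mod_cast h0
      subst hn0
      simp [Nat.zero_testBit]
    · have hn : 0 < n := by
        rcases Nat.eq_zero_or_pos n with h | h
        · subst h; simp at h0
        · exact h
      have hm1 : 1 ≤ m := by
        by_contra hc
        have : m = 0 := by omega
        subst this
        simp at hm; omega
      obtain ⟨m', rfl⟩ : ∃ m', m = m' + 1 := ⟨m - 1, by omega⟩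
      rw [if_neg h0]
      have hmod : PySem.Int.mod ((n : Nat) : Int) 2 = (((n % 2 : Nat) : Nat) : Int) := by
        exact_mod_cast PySem.Int.mod_natCast n 2
      have hdiv : PySem.Int.floordiv ((n : Nat) : Int) 2 = (((n / 2 : Nat) : Nat) : Int) := by
        exact_mod_cast PySem.Int.floordiv_natCast n 2
      have hget : PySem.List.pyGet? all ((i : Nat) : Int) = some (all.getD i "") := by
        rw [PySem.List.pyGet?_natCast]
        rw [List.getElem?_eq_getElem (by omega), List.getD_eq_getElem all "" (by omega)]
      have hi1 : ((i : Nat) : Int) + 1 = (((i + 1 : Nat) : Nat) : Int) := by push_cast; ring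
      have hsplit : ((List.range (m' + 1)).filter n.testBit).map (fun k => all.getD (i + k) "")
          = (if n % 2 = 1 then [all.getD i ""] else [])
            ++ ((List.range m').filter (n / 2).testBit).map (fun k => all.getD ((i + 1) + k) "") := by
        rw [List.range_succ_eq_map, List.filter_cons, List.filter_map, Nat.testBit_zero]
        have hp : (n.testBit ∘ Nat.succ) = (n / 2).testBit := by
          funext k; exact Nat.testBit_succ n k
        rw [hp]
        by_cases hpar : n % 2 = 1
        · rw [if_pos (by simpa using hpar), List.map_cons, List.map_map, if_pos hpar]
          simp only [Nat.add_zero, List.singleton_append, List.cons.injEq, true_and]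
          apply List.map_congr_left
          intro k _
          have h3 : i + (k + 1) = i + 1 + k := by omega
          simp [Function.comp, Nat.succ_eq_add_one, h3]
        · rw [if_neg (by simpa using hpar), List.map_map, if_neg hpar, List.nil_append]
          apply List.map_congr_left
          intro k _
          have h3 : i + (k + 1) = i + 1 + k := by omega
          simp [Function.comp, Nat.succ_eq_add_one, h3]
      rw [hsplit]
      have hdiv2 : n / 2 < fuel := by omega
      have hdivm : n / 2 < 2 ^ m' := by
        have h2 : 2 ^ (m' + 1) = 2 ^ m' * 2 := by ring
        omega
      by_cases hpar : n % 2 = 1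
      · have hcond : ¬(((n % 2 : Nat) : Nat) : Int) = 0 := by rw [hpar]; norm_num
        rw [hmod, hdiv, hget, hi1]
        simp only [ne_eq, hcond, not_false_eq_true, if_true]
        rw [ih (n / 2) m' (i + 1) all (acc ++ [all.getD i ""]) hdiv2 hdivm (by omega), if_pos hpar]
        simp [List.append_assoc]
      · have h2 : n % 2 = 0 := by omega
        have hcond : (((n % 2 : Nat) : Nat) : Int) = 0 := by rw [h2]; norm_num
        rw [hmod, hdiv, hi1]
        simp only [ne_eq, hcond, not_true_eq_false, if_false]
        rw [ih (n / 2) m' (i + 1) all acc hdiv2 hdivm (by omega), if_neg hpar]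
        simp

-- ===== VERDICT (by name: the statement is the Claim_ definition above) =====
theorem binaryToEntities_spec : Claim_equal_binaryToEntities := by
  intro binary all _ hpre
  obtain ⟨h0, hlt⟩ := hpre
  obtain ⟨n, rfl⟩ : ∃ n : Nat, binary = (n : Int) := ⟨binary.toNat, (Int.toNat_of_nonneg h0).symm⟩
  have hn : n < 2 ^ all.length := by exact_mod_cast hlt
  unfold Spec_binaryToEntities binaryToEntities binaryToEntities_alt
  rw [Int.toNat_natCast, Int.natAbs_natCast, if_neg (by omega : ¬((n : Nat) : Int) < 0)]
  simp only [List.nil_append, List.drop_succ_cons, List.drop_zero, List.cons_append]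
  have hl := pvLoopLem (n + 1) n all.length 0 all [] (by omega) hn (by omega)
  simp only [Nat.cast_zero] at hl
  rw [hl]
  rcases Nat.eq_zero_or_pos n with rfl | hpos
  · simp [pyBin, PySem.List.enumerate_cons, PySem.List.enumerate_nil, Nat.zero_testBit]
  · rw [show pyBin n = pyBinAux n from by rw [pyBin, if_neg (by omega)]]
    have hz := pvZ n all.length 0 all hn (by omega)
    simp only [Nat.cast_zero] at hz
    rw [hz]
    simp
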